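-- pv_equiv track=rewrite | github.com/doctorgu/coding-test | python/programmers/walking_park.py | solution
-- ===== SOURCE A (Python) =====
-- def solution(park, routes):
--     # 공원의 크기 구하기
--     height = len(park)
--     width = len(park[0])
--
--     # 강아지의 시작 위치 찾기
--     start_row = 0
--     start_col = 0
--     for i in range(height):
--         for j in range(width):
--             if park[i][j] == "S":
--                 start_row = i
--                 start_col = j
--                 break
--
--     # 강아지 이동 함수
--     # inserted new variable row_new, col_new from generated code to fix bug
--     def move(row, col, direction, distance):
--         row_new, col_new = row, col
--         if direction == "N":
--             for i in range(distance):
--                 if row_new == 0 or park[row_new-1][col_new] == "X":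
--                     return row, col
--                 row_new -= 1
--         elif direction == "S":
--             for i in range(distance):
--                 if row_new == height-1 or park[row_new+1][col_new] == "X":
--                     return row, col
--                 row_new += 1
--         elif direction == "W":
--             for i in range(distance):
--                 if col_new == 0 or park[row_new][col_new-1] == "X":
--                     return row, col
--                 col_new -= 1
--         elif direction == "E":
--             for i in range(distance):
--                 if col_new == width-1 or park[row_new][col_new+1] == "X":
--                     return row, col
--                 col_new += 1
--         return row_new, col_new
--
--     # 강아지 이동하기
--     for route in routes:
--         direction, distance = route.split()
--         distance = int(distance)
--         start_row, start_col = move(start_row, start_col, direction, distance)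
--
--     # 결과 반환
--     return [start_row, start_col]
-- ===== SOURCE B (Python) =====
-- def solution(park, routes):
--     # Transpose-based approach: precompute each column as a string; a move becomes a
--     # bounds check plus a substring membership test on a slice of a row/column string.
--     h, w = len(park), len(park[0])
--     cols = ["".join(park[i][j] for i in range(h)) for j in range(w)]
--     r, c = 0, 0
--     for i in range(h):
--         j = park[i][:w].find("S")
--         if j != -1:
--             r, c = i, j
--             break
--     for route in routes:
--         d, n = route.split()
--         n = int(n)
--         if n <= 0:
--             continue
--         if d == "N":
--             if r - n >= 0 and "X" not in cols[c][r - n:r]: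
--                 r -= n
--         elif d == "S":
--             if r + n < h and "X" not in cols[c][r + 1:r + n + 1]:
--                 r += n
--         elif d == "W":
--             if c - n >= 0 and "X" not in park[r][c - n:c]:
--                 c -= n
--         elif d == "E":
--             if c + n < w and "X" not in park[r][c + 1:c + n + 1]:
--                 c += n
--     return [r, c]
-- ===== Notes on version B (the rewrite author's own statement) =====
-- stated objective: alternative
-- what changed: B transposes the park into column strings once and finds the start with str.find on row prefixes; each move then becomes a single bounds check plus a substring membership test ('X' not in slice) on a row/column string, instead of A's four per-direction cell-by-cell stepping loops with early returns.
-- outside the precondition, e.g. on solution(['S.', '.S'], []): A returns [1, 1], B returns [0, 0]; on solution(['ab', 'S'], []): A returns [1, 0], B raises IndexError; on solution([''], ['N 1']): A returns [0, 0], B returns [0, 0]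
import Mathlib
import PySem

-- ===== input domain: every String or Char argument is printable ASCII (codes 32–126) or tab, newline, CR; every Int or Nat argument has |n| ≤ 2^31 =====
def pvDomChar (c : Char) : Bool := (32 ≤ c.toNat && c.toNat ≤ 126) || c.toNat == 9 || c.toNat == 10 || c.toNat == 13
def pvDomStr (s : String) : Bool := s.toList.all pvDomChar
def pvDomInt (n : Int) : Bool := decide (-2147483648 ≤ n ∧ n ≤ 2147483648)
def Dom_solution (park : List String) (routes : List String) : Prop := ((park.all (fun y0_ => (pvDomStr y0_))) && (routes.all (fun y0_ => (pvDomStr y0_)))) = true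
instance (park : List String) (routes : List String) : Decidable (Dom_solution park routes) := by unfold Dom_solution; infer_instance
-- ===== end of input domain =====

-- B transposes the park into column strings and turns each move into a bounds check plus one
-- substring membership test on a slice of a row/column string (objective: alternative).

-- ===== PORT A =====
-- park[i][j] as a total function (every use is in range under Pre_solution)
def pvCell (park : List String) (i j : Int) : Char :=
  (PySem.Str.pyGet? (PySem.List.pyGetD park i "") j).getD '?'

-- inner 'for j in range(width): if park[i][j]=="S": …; break'
def pvScanRow (park : List String) (i : Int) (js : List Int) (st : Int × Int) : Int × Int :=
  match js with
  | [] => st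
  | j :: rest => if pvCell park i j = 'S' then (i, j) else pvScanRow park i rest st

-- the four direction loops of A's 'move', each with the early 'return row, col'
def pvMoveN (park : List String) (row col : Int) (rn : Int) : Nat → Int × Int
  | 0 => (rn, col)
  | n+1 => if rn = 0 ∨ pvCell park (rn - 1) col = 'X' then (row, col)
           else pvMoveN park row col (rn - 1) n

def pvMoveS (park : List String) (height row col : Int) (rn : Int) : Nat → Int × Int
  | 0 => (rn, col)
  | n+1 => if rn = height - 1 ∨ pvCell park (rn + 1) col = 'X' then (row, col)
           else pvMoveS park height row col (rn + 1) n

def pvMoveW (park : List String) (row col : Int) (cn : Int) : Nat → Int × Int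
  | 0 => (row, cn)
  | n+1 => if cn = 0 ∨ pvCell park row (cn - 1) = 'X' then (row, col)
           else pvMoveW park row col (cn - 1) n

def pvMoveE (park : List String) (width row col : Int) (cn : Int) : Nat → Int × Int
  | 0 => (row, cn)
  | n+1 => if cn = width - 1 ∨ pvCell park row (cn + 1) = 'X' then (row, col)
           else pvMoveE park width row col (cn + 1) n

def pvMove (park : List String) (height width row col : Int) (direction : String) (distance : Int) : Int × Int :=
  if direction = "N" then pvMoveN park row col row distance.toNat
  else if direction = "S" then pvMoveS park height row col row distance.toNat
  else if direction = "W" then pvMoveW park row col col distance.toNat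
  else if direction = "E" then pvMoveE park width row col col distance.toNat
  else (row, col)

def solution (park : List String) (routes : List String) : List Int :=
  let height : Int := park.length
  let width : Int := PySem.Str.len (PySem.List.pyGetD park 0 "")
  let st0 := (PySem.List.pyRange 0 height 1).foldl
    (fun st i => pvScanRow park i (PySem.List.pyRange 0 width 1) st) (0, 0)
  let fin := routes.foldl (fun st route =>
    match PySem.Str.split₀ route with
    | [d, ns] => pvMove park height width st.1 st.2 d ((PySem.Int.ofStr? ns).getD 0)
    | _ => st) st0    -- a route that does not split into two parts raises in Python; outside Pre_solution
  [fin.1, fin.2]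

-- ===== PORT B =====
-- B's own park[i][j] accessor (in range under Pre_solution wherever B evaluates it)
def pvCellAlt (park : List String) (i j : Int) : Char :=
  (PySem.Str.pyGet? (PySem.List.pyGetD park i "") j).getD '?'

-- cols = ["".join(park[i][j] for i in range(h)) for j in range(w)]
-- (the join of the one-character strings park[i][j] is exactly the string of those characters)
def pvCols (park : List String) (h w : Int) : List String :=
  (PySem.List.pyRange 0 w 1).map
    (fun j => String.ofList ((PySem.List.pyRange 0 h 1).map (fun i => pvCellAlt park i j)))

-- 'for i in range(h): j = park[i][:w].find("S"); if j != -1: r, c = i, j; break'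
def pvScanStart (park : List String) (w : Int) : List Int → Int × Int
  | [] => (0, 0)
  | i :: rest =>
    let j := PySem.Str.find (PySem.Str.slice (PySem.List.pyGetD park i "") none (some w)) "S"
    if j ≠ -1 then (i, j) else pvScanStart park w rest

-- one route of B's loop: bounds check + substring membership on a row/column slice
def pvStepB (park cols : List String) (h w : Int) (st : Int × Int) (route : String) : Int × Int :=
  -- 'd, n = route.split()' ported as a length-2 check with positional access
  let parts := PySem.Str.split₀ route
  if parts.length = 2 then
    let d := parts.getD 0 ""
    let ns := parts.getD 1 ""
    let n := (PySem.Int.ofStr? ns).getD 0    -- int(ns); ValueError outside Pre_solution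
    if n ≤ 0 then st
    else if d = "N" then
      if 0 ≤ st.1 - n ∧ PySem.Str.isIn "X"
          (PySem.Str.slice (PySem.List.pyGetD cols st.2 "") (some (st.1 - n)) (some st.1)) = false
      then (st.1 - n, st.2) else st
    else if d = "S" then
      if st.1 + n < h ∧ PySem.Str.isIn "X"
          (PySem.Str.slice (PySem.List.pyGetD cols st.2 "") (some (st.1 + 1)) (some (st.1 + n + 1))) = false
      then (st.1 + n, st.2) else st
    else if d = "W" then
      if 0 ≤ st.2 - n ∧ PySem.Str.isIn "X"
          (PySem.Str.slice (PySem.List.pyGetD park st.1 "") (some (st.2 - n)) (some st.2)) = false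
      then (st.1, st.2 - n) else st
    else if d = "E" then
      if st.2 + n < w ∧ PySem.Str.isIn "X"
          (PySem.Str.slice (PySem.List.pyGetD park st.1 "") (some (st.2 + 1)) (some (st.2 + n + 1))) = false
      then (st.1, st.2 + n) else st
    else st
  else st    -- a route that does not split into two parts raises in Python; outside Pre_solution

def solution_alt (park : List String) (routes : List String) : List Int :=
  let h : Int := park.length
  let w : Int := PySem.Str.len (PySem.List.pyGetD park 0 "")
  let cols := pvCols park h w
  let st0 := pvScanStart park w (PySem.List.pyRange 0 h 1)
  let fin := routes.foldl (pvStepB park cols h w) st0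
  [fin.1, fin.2]

-- ===== PRECONDITION & SPEC =====
-- well-formedness of one route string, used by Pre_solution below
def pvRouteOk (r : String) : Bool :=
  decide ((PySem.Str.split₀ r).length = 2) &&
    (PySem.Int.ofStr? ((PySem.Str.split₀ r).getD 1 "")).isSome

-- Pre_ excludes inputs where A raises (empty park, rows shorter than width len(park[0]) — a coarse
-- shape condition, so it also drops some ragged parks A happens to return on — a route that is
-- not "<token> <int>", any actual step attempt on a zero-width park) and parks with several 'S'
-- in the scanned width, where which one is the start is anybody's choice: A keeps the last row
-- containing one, B the first (see the cites).
def Pre_solution (park : List String) (routes : List String) : Prop :=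
  park ≠ [] ∧
  (∀ s ∈ park, PySem.Str.len (PySem.List.pyGetD park 0 "") ≤ PySem.Str.len s) ∧
  (park.flatMap (fun s => s.toList.take (PySem.Str.len (PySem.List.pyGetD park 0 "")).toNat)).count 'S' ≤ 1 ∧
  routes.all pvRouteOk = true ∧
  (routes = [] ∨ 1 ≤ PySem.Str.len (PySem.List.pyGetD park 0 ""))

instance (park : List String) (routes : List String) : Decidable (Pre_solution park routes) := by
  unfold Pre_solution; infer_instance

def pvWitness_solution : List String × List String := (["SO", "OX"], ["E 1", "S 1"])

def Spec_solution (park : List String) (routes : List String) (out : List Int) : Prop := out = solution_alt park routes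
instance (park : List String) (routes : List String) (out : List Int) : Decidable (Spec_solution park routes out) := by unfold Spec_solution; infer_instance

-- ===== CLAIM (what is proved, stated in full; the proofs are below) =====
def Claim_equal_solution : Prop := ∀ (park : List String) (routes : List String), Dom_solution park routes → Pre_solution park routes → Spec_solution park routes (solution park routes)

-- ===== LEMMAS AND PROOFS =====

def pvInb (park : List String) (W : Int) (p : Int × Int) : Prop :=
  0 ≤ p.1 ∧ p.1 < (park.length : Int) ∧ 0 ≤ p.2 ∧ p.2 < W

theorem pv_ge_of_ne (m : Nat) (x : Int) (hx : 0 ≤ x)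
    (h : ∀ j : Nat, j < m → x ≠ (j : Int)) : (m : Int) ≤ x := by
  induction m with
  | zero => exact hx
  | succ k ih =>
    have h1 := ih (fun j hj => h j (by omega))
    have h2 := h k (by omega)
    omega

theorem pvCellAlt_eq : pvCellAlt = pvCell := rfl

theorem pvMoveN_spec (park : List String) (row col : Int) : ∀ (n : Nat) (rn : Int),
    pvMoveN park row col rn n =
    if (∀ k : Nat, k < n → (rn - (k : Int) ≠ 0 ∧ pvCell park (rn - (k : Int) - 1) col ≠ 'X'))
    then (rn - (n : Int), col) else (row, col) := by
  intro n
  induction n with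
  | zero => intro rn; simp [pvMoveN]
  | succ m ih =>
    intro rn
    rw [pvMoveN]
    by_cases hg : rn = 0 ∨ pvCell park (rn - 1) col = 'X'
    · rw [if_pos hg]
      have hno : ¬ (∀ k : Nat, k < m + 1 → (rn - (k : Int) ≠ 0 ∧ pvCell park (rn - (k : Int) - 1) col ≠ 'X')) := by
        intro hall
        have h0 := hall 0 (by omega)
        simp only [Nat.cast_zero, sub_zero] at h0
        tauto
      rw [if_neg hno]
    · rw [if_neg hg, ih (rn - 1)]
      rw [not_or] at hg
      have hiff : (∀ k : Nat, k < m → (rn - 1 - (k : Int) ≠ 0 ∧ pvCell park (rn - 1 - (k : Int) - 1) col ≠ 'X'))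
          ↔ (∀ k : Nat, k < m + 1 → (rn - (k : Int) ≠ 0 ∧ pvCell park (rn - (k : Int) - 1) col ≠ 'X')) := by
        constructor
        · intro h k hk
          cases k with
          | zero => simpa using hg
          | succ k' =>
            have h' := h k' (by omega)
            have harg : rn - 1 - (k' : Int) - 1 = rn - ((k' + 1 : Nat) : Int) - 1 := by push_cast; ring
            have hv : rn - 1 - (k' : Int) = rn - ((k' + 1 : Nat) : Int) := by push_cast; ring
            rw [harg, hv] at h'
            exact h'
        · intro h k hk
          have h' := h (k + 1) (by omega)
          have harg : rn - ((k + 1 : Nat) : Int) - 1 = rn - 1 - (k : Int) - 1 := by push_cast; ring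
          have hv : rn - ((k + 1 : Nat) : Int) = rn - 1 - (k : Int) := by push_cast; ring
          rw [harg, hv] at h'
          exact h'
      have hval : rn - 1 - (m : Int) = rn - ((m + 1 : Nat) : Int) := by push_cast; ring
      rw [if_congr hiff (by rw [hval]) rfl]

theorem pvMoveS_spec (park : List String) (H row col : Int) : ∀ (n : Nat) (rn : Int),
    pvMoveS park H row col rn n =
    if (∀ k : Nat, k < n → (rn + (k : Int) ≠ H - 1 ∧ pvCell park (rn + (k : Int) + 1) col ≠ 'X'))
    then (rn + (n : Int), col) else (row, col) := by
  intro n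
  induction n with
  | zero => intro rn; simp [pvMoveS]
  | succ m ih =>
    intro rn
    rw [pvMoveS]
    by_cases hg : rn = H - 1 ∨ pvCell park (rn + 1) col = 'X'
    · rw [if_pos hg]
      have hno : ¬ (∀ k : Nat, k < m + 1 → (rn + (k : Int) ≠ H - 1 ∧ pvCell park (rn + (k : Int) + 1) col ≠ 'X')) := by
        intro hall
        have h0 := hall 0 (by omega)
        simp only [Nat.cast_zero, add_zero] at h0
        tauto
      rw [if_neg hno]
    · rw [if_neg hg, ih (rn + 1)]
      rw [not_or] at hg
      have hiff : (∀ k : Nat, k < m → (rn + 1 + (k : Int) ≠ H - 1 ∧ pvCell park (rn + 1 + (k : Int) + 1) col ≠ 'X'))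
          ↔ (∀ k : Nat, k < m + 1 → (rn + (k : Int) ≠ H - 1 ∧ pvCell park (rn + (k : Int) + 1) col ≠ 'X')) := by
        constructor
        · intro h k hk
          cases k with
          | zero => simpa using hg
          | succ k' =>
            have h' := h k' (by omega)
            have harg : rn + 1 + (k' : Int) + 1 = rn + ((k' + 1 : Nat) : Int) + 1 := by push_cast; ring
            have hv : rn + 1 + (k' : Int) = rn + ((k' + 1 : Nat) : Int) := by push_cast; ring
            rw [harg, hv] at h'
            exact h'
        · intro h k hk
          have h' := h (k + 1) (by omega)
          have harg : rn + ((k + 1 : Nat) : Int) + 1 = rn + 1 + (k : Int) + 1 := by push_cast; ring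
          have hv : rn + ((k + 1 : Nat) : Int) = rn + 1 + (k : Int) := by push_cast; ring
          rw [harg, hv] at h'
          exact h'
      have hval : rn + 1 + (m : Int) = rn + ((m + 1 : Nat) : Int) := by push_cast; ring
      rw [if_congr hiff (by rw [hval]) rfl]

theorem pvMoveW_spec (park : List String) (row col : Int) : ∀ (n : Nat) (cn : Int),
    pvMoveW park row col cn n =
    if (∀ k : Nat, k < n → (cn - (k : Int) ≠ 0 ∧ pvCell park row (cn - (k : Int) - 1) ≠ 'X'))
    then (row, cn - (n : Int)) else (row, col) := by
  intro n
  induction n with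
  | zero => intro cn; simp [pvMoveW]
  | succ m ih =>
    intro cn
    rw [pvMoveW]
    by_cases hg : cn = 0 ∨ pvCell park row (cn - 1) = 'X'
    · rw [if_pos hg]
      have hno : ¬ (∀ k : Nat, k < m + 1 → (cn - (k : Int) ≠ 0 ∧ pvCell park row (cn - (k : Int) - 1) ≠ 'X')) := by
        intro hall
        have h0 := hall 0 (by omega)
        simp only [Nat.cast_zero, sub_zero] at h0
        tauto
      rw [if_neg hno]
    · rw [if_neg hg, ih (cn - 1)]
      rw [not_or] at hg
      have hiff : (∀ k : Nat, k < m → (cn - 1 - (k : Int) ≠ 0 ∧ pvCell park row (cn - 1 - (k : Int) - 1) ≠ 'X'))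
          ↔ (∀ k : Nat, k < m + 1 → (cn - (k : Int) ≠ 0 ∧ pvCell park row (cn - (k : Int) - 1) ≠ 'X')) := by
        constructor
        · intro h k hk
          cases k with
          | zero => simpa using hg
          | succ k' =>
            have h' := h k' (by omega)
            have harg : cn - 1 - (k' : Int) - 1 = cn - ((k' + 1 : Nat) : Int) - 1 := by push_cast; ring
            have hv : cn - 1 - (k' : Int) = cn - ((k' + 1 : Nat) : Int) := by push_cast; ring
            rw [harg, hv] at h'
            exact h'
        · intro h k hk
          have h' := h (k + 1) (by omega)
          have harg : cn - ((k + 1 : Nat) : Int) - 1 = cn - 1 - (k : Int) - 1 := by push_cast; ring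
          have hv : cn - ((k + 1 : Nat) : Int) = cn - 1 - (k : Int) := by push_cast; ring
          rw [harg, hv] at h'
          exact h'
      have hval : cn - 1 - (m : Int) = cn - ((m + 1 : Nat) : Int) := by push_cast; ring
      rw [if_congr hiff (by rw [hval]) rfl]

theorem pvMoveE_spec (park : List String) (W row col : Int) : ∀ (n : Nat) (cn : Int),
    pvMoveE park W row col cn n =
    if (∀ k : Nat, k < n → (cn + (k : Int) ≠ W - 1 ∧ pvCell park row (cn + (k : Int) + 1) ≠ 'X'))
    then (row, cn + (n : Int)) else (row, col) := by
  intro n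
  induction n with
  | zero => intro cn; simp [pvMoveE]
  | succ m ih =>
    intro cn
    rw [pvMoveE]
    by_cases hg : cn = W - 1 ∨ pvCell park row (cn + 1) = 'X'
    · rw [if_pos hg]
      have hno : ¬ (∀ k : Nat, k < m + 1 → (cn + (k : Int) ≠ W - 1 ∧ pvCell park row (cn + (k : Int) + 1) ≠ 'X')) := by
        intro hall
        have h0 := hall 0 (by omega)
        simp only [Nat.cast_zero, add_zero] at h0
        tauto
      rw [if_neg hno]
    · rw [if_neg hg, ih (cn + 1)]
      rw [not_or] at hg
      have hiff : (∀ k : Nat, k < m → (cn + 1 + (k : Int) ≠ W - 1 ∧ pvCell park row (cn + 1 + (k : Int) + 1) ≠ 'X'))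
          ↔ (∀ k : Nat, k < m + 1 → (cn + (k : Int) ≠ W - 1 ∧ pvCell park row (cn + (k : Int) + 1) ≠ 'X')) := by
        constructor
        · intro h k hk
          cases k with
          | zero => simpa using hg
          | succ k' =>
            have h' := h k' (by omega)
            have harg : cn + 1 + (k' : Int) + 1 = cn + ((k' + 1 : Nat) : Int) + 1 := by push_cast; ring
            have hv : cn + 1 + (k' : Int) = cn + ((k' + 1 : Nat) : Int) := by push_cast; ring
            rw [harg, hv] at h'
            exact h'
        · intro h k hk
          have h' := h (k + 1) (by omega)
          have harg : cn + ((k + 1 : Nat) : Int) + 1 = cn + 1 + (k : Int) + 1 := by push_cast; ring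
          have hv : cn + ((k + 1 : Nat) : Int) = cn + 1 + (k : Int) := by push_cast; ring
          rw [harg, hv] at h'
          exact h'
      have hval : cn + 1 + (m : Int) = cn + ((m + 1 : Nat) : Int) := by push_cast; ring
      rw [if_congr hiff (by rw [hval]) rfl]

theorem pvSingletonInfix (l : List Char) (x : Char) : [x] <:+: l ↔ x ∈ l := by
  constructor
  · intro h
    exact List.singleton_sublist.mp h.sublist
  · intro h
    obtain ⟨s, t, rfl⟩ := List.append_of_mem h
    exact ⟨s, t, by simp⟩

theorem pvMemSliceIff (l : List Char) (a b : Int) (x : Char)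
    (h0 : 0 ≤ a) (hb0 : 0 ≤ b) :
    x ∈ PySem.List.slice l (some a) (some b) ↔
      ∃ i : Int, a ≤ i ∧ i < b ∧ l[i.toNat]? = some x := by
  rw [PySem.List.slice_toNat l h0 hb0]
  constructor
  · intro h
    obtain ⟨k, hk⟩ := List.mem_iff_getElem?.mp h
    rw [List.getElem?_take] at hk
    split_ifs at hk with hkm
    · rw [List.getElem?_drop] at hk
      refine ⟨((a.toNat + k : Nat) : Int), by omega, by omega, ?_⟩
      rw [show (((a.toNat + k : Nat) : Int)).toNat = a.toNat + k by omega]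
      exact hk
  · rintro ⟨i, hi1, hi2, hi3⟩
    refine List.mem_iff_getElem?.mpr ⟨i.toNat - a.toNat, ?_⟩
    rw [List.getElem?_take, if_pos (by omega), List.getElem?_drop,
      show a.toNat + (i.toNat - a.toNat) = i.toNat by omega]
    exact hi3

theorem pvXfreeIff (s : String) (a b : Int)
    (h0 : 0 ≤ a) (hb0 : 0 ≤ b) :
    (PySem.Str.isIn "X" (PySem.Str.slice s (some a) (some b)) = false) ↔
      ∀ i : Int, a ≤ i → i < b → s.toList[i.toNat]? ≠ some 'X' := by
  have h1 : PySem.Str.isIn "X" (PySem.Str.slice s (some a) (some b)) =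
      PySem.Chars.isIn ['X'] (PySem.List.slice s.toList (some a) (some b)) := by
    simp
  rw [h1, PySem.Chars.isIn_eq_false_iff, pvSingletonInfix]
  rw [pvMemSliceIff s.toList a b 'X' h0 hb0]
  push Not
  constructor
  · intro h i hi1 hi2
    exact h i hi1 hi2
  · intro h i hi1 hi2
    exact h i hi1 hi2

theorem pvCellGet (park : List String) (r j : Int) (h0 : 0 ≤ j)
    (hlt : j.toNat < (PySem.List.pyGetD park r "").toList.length) :
    (PySem.List.pyGetD park r "").toList[j.toNat]? = some (pvCell park r j) := by
  unfold pvCell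
  have h1 : PySem.Str.pyGet? (PySem.List.pyGetD park r "") j =
      (PySem.List.pyGetD park r "").toList[j.toNat]? := by
    simp [PySem.List.pyGet?_of_nonneg _ h0]
  rw [h1, List.getElem?_eq_getElem hlt]
  rfl

theorem pvColGet (park : List String) (c i : Int) (h0 : 0 ≤ i) (hi : i < (park.length : Int)) :
    ((PySem.List.pyRange 0 ((park.length : Nat) : Int) 1).map
      (fun k => pvCellAlt park k c))[i.toNat]? = some (pvCellAlt park i c) := by
  have h := PySem.List.getElem?_map_pyRange_zero (fun k => pvCellAlt park k c)
    park.length i.toNat (by omega)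
  rw [h, show ((i.toNat : Nat) : Int) = i by omega]

theorem pvCoreN (park : List String) (st : Int × Int) (h0 : 0 ≤ st.1) (n : Int) (hn : 1 ≤ n) :
    pvMoveN park st.1 st.2 st.1 n.toNat =
      if 0 ≤ st.1 - n ∧ (∀ i : Int, st.1 - n ≤ i → i < st.1 → pvCell park i st.2 ≠ 'X')
      then (st.1 - n, st.2) else (st.1, st.2) := by
  rw [pvMoveN_spec, show ((n.toNat : Nat) : Int) = n by omega]
  refine if_congr ?_ rfl rfl
  constructor
  · intro hA
    have hge : 0 ≤ st.1 - n := by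
      have := pv_ge_of_ne n.toNat st.1 h0 (fun j hj => by
        have := (hA j hj).1; omega)
      omega
    refine ⟨hge, fun i hi1 hi2 => ?_⟩
    have hk : (st.1 - 1 - i).toNat < n.toNat := by omega
    have hc := (hA (st.1 - 1 - i).toNat hk).2
    rwa [show st.1 - ((st.1 - 1 - i).toNat : Int) - 1 = i by omega] at hc
  · rintro ⟨hge, hcells⟩ k hk
    exact ⟨by omega, hcells (st.1 - (k : Int) - 1) (by omega) (by omega)⟩

theorem pvCoreS (park : List String) (st : Int × Int) (H : Int) (h0 : st.1 ≤ H - 1) (n : Int) (hn : 1 ≤ n) :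
    pvMoveS park H st.1 st.2 st.1 n.toNat =
      if st.1 + n < H ∧ (∀ i : Int, st.1 + 1 ≤ i → i < st.1 + n + 1 → pvCell park i st.2 ≠ 'X')
      then (st.1 + n, st.2) else (st.1, st.2) := by
  rw [pvMoveS_spec, show ((n.toNat : Nat) : Int) = n by omega]
  refine if_congr ?_ rfl rfl
  constructor
  · intro hA
    have hge : (n.toNat : Int) ≤ H - 1 - st.1 := pv_ge_of_ne n.toNat (H - 1 - st.1) (by omega)
      (fun j hj => by have := (hA j hj).1; omega)
    refine ⟨by omega, fun i hi1 hi2 => ?_⟩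
    have hk : (i - st.1 - 1).toNat < n.toNat := by omega
    have hc := (hA (i - st.1 - 1).toNat hk).2
    rwa [show st.1 + ((i - st.1 - 1).toNat : Int) + 1 = i by omega] at hc
  · rintro ⟨hge, hcells⟩ k hk
    exact ⟨by omega, hcells (st.1 + (k : Int) + 1) (by omega) (by omega)⟩

theorem pvCoreW (park : List String) (st : Int × Int) (h0 : 0 ≤ st.2) (n : Int) (hn : 1 ≤ n) :
    pvMoveW park st.1 st.2 st.2 n.toNat =
      if 0 ≤ st.2 - n ∧ (∀ i : Int, st.2 - n ≤ i → i < st.2 → pvCell park st.1 i ≠ 'X')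
      then (st.1, st.2 - n) else (st.1, st.2) := by
  rw [pvMoveW_spec, show ((n.toNat : Nat) : Int) = n by omega]
  refine if_congr ?_ rfl rfl
  constructor
  · intro hA
    have hge : 0 ≤ st.2 - n := by
      have := pv_ge_of_ne n.toNat st.2 h0 (fun j hj => by
        have := (hA j hj).1; omega)
      omega
    refine ⟨hge, fun i hi1 hi2 => ?_⟩
    have hk : (st.2 - 1 - i).toNat < n.toNat := by omega
    have hc := (hA (st.2 - 1 - i).toNat hk).2
    rwa [show st.2 - ((st.2 - 1 - i).toNat : Int) - 1 = i by omega] at hc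
  · rintro ⟨hge, hcells⟩ k hk
    exact ⟨by omega, hcells (st.2 - (k : Int) - 1) (by omega) (by omega)⟩

theorem pvCoreE (park : List String) (st : Int × Int) (W : Int) (h0 : st.2 ≤ W - 1) (n : Int) (hn : 1 ≤ n) :
    pvMoveE park W st.1 st.2 st.2 n.toNat =
      if st.2 + n < W ∧ (∀ i : Int, st.2 + 1 ≤ i → i < st.2 + n + 1 → pvCell park st.1 i ≠ 'X')
      then (st.1, st.2 + n) else (st.1, st.2) := by
  rw [pvMoveE_spec, show ((n.toNat : Nat) : Int) = n by omega]
  refine if_congr ?_ rfl rfl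
  constructor
  · intro hA
    have hge : (n.toNat : Int) ≤ W - 1 - st.2 := pv_ge_of_ne n.toNat (W - 1 - st.2) (by omega)
      (fun j hj => by have := (hA j hj).1; omega)
    refine ⟨by omega, fun i hi1 hi2 => ?_⟩
    have hk : (i - st.2 - 1).toNat < n.toNat := by omega
    have hc := (hA (i - st.2 - 1).toNat hk).2
    rwa [show st.2 + ((i - st.2 - 1).toNat : Int) + 1 = i by omega] at hc
  · rintro ⟨hge, hcells⟩ k hk
    exact ⟨by omega, hcells (st.2 + (k : Int) + 1) (by omega) (by omega)⟩

theorem pvColCondIff (park : List String) (W c a b : Int)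
    (hc0 : 0 ≤ c) (hcW : c < W) (h0 : 0 ≤ a) (hb0 : 0 ≤ b) (hbh : b ≤ (park.length : Int)) :
    (PySem.Str.isIn "X" (PySem.Str.slice
        (PySem.List.pyGetD (pvCols park (park.length : Int) W) c "") (some a) (some b)) = false)
    ↔ ∀ i : Int, a ≤ i → i < b → pvCell park i c ≠ 'X' := by
  have hcol : PySem.List.pyGetD (pvCols park (park.length : Int) W) c "" =
      String.ofList ((PySem.List.pyRange 0 ((park.length : Nat) : Int) 1).map
        (fun i => pvCellAlt park i c)) := by
    unfold pvCols
    exact PySem.List.pyGetD_map_pyRange_of_nonneg _ W c "" hc0 hcW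
  rw [hcol, pvXfreeIff _ a b h0 hb0]
  constructor
  · intro h i hi1 hi2 hX
    refine h i hi1 hi2 ?_
    rw [String.toList_ofList, pvColGet park c i (by omega) (by omega), pvCellAlt_eq, hX]
  · intro h i hi1 hi2 hsome
    rw [String.toList_ofList, pvColGet park c i (by omega) (by omega), pvCellAlt_eq] at hsome
    exact h i hi1 hi2 (Option.some_inj.mp hsome)

theorem pvRowCondIff (park : List String) (r a b : Int)
    (h0 : 0 ≤ a) (hb0 : 0 ≤ b)
    (hbl : b ≤ PySem.Str.len (PySem.List.pyGetD park r "")) :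
    (PySem.Str.isIn "X" (PySem.Str.slice (PySem.List.pyGetD park r "") (some a) (some b)) = false)
    ↔ ∀ i : Int, a ≤ i → i < b → pvCell park r i ≠ 'X' := by
  have hlen : PySem.Str.len (PySem.List.pyGetD park r "") =
      ((PySem.List.pyGetD park r "").toList.length : Int) := by
    simp [PySem.Str.len_eq]
  rw [hlen] at hbl
  rw [pvXfreeIff _ a b h0 hb0]
  constructor
  · intro h i hi1 hi2 hX
    refine h i hi1 hi2 ?_
    rw [pvCellGet park r i (by omega) (by omega), hX]
  · intro h i hi1 hi2 hsome
    rw [pvCellGet park r i (by omega) (by omega)] at hsome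
    exact h i hi1 hi2 (Option.some_inj.mp hsome)

theorem pvStep_eq (park : List String) (W : Int) (st : Int × Int)
    (hst : pvInb park W st)
    (hrect : ∀ s ∈ park, W ≤ PySem.Str.len s)
    (route : String) (hr : pvRouteOk route = true) :
    (match PySem.Str.split₀ route with
     | [d, ns] => pvMove park (park.length : Int) W st.1 st.2 d ((PySem.Int.ofStr? ns).getD 0)
     | _ => st) = pvStepB park (pvCols park (park.length : Int) W) (park.length : Int) W st route
    ∧ pvInb park W (pvStepB park (pvCols park (park.length : Int) W) (park.length : Int) W st route) := by
  obtain ⟨hr0, hr1, hc0, hc1⟩ := hst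
  unfold pvRouteOk at hr
  rcases hsp : PySem.Str.split₀ route with _ | ⟨d, _ | ⟨ns, _ | ⟨x, tl⟩⟩⟩ <;> rw [hsp] at hr <;> try (simp at hr)
  simp only [pvStepB, hsp]
  simp only [show ([d, ns] : List String).length = 2 from rfl,
    show ([d, ns] : List String).getD 0 "" = d from rfl,
    show ([d, ns] : List String).getD 1 "" = ns from rfl, reduceIte]
  by_cases hnp : (PySem.Int.ofStr? ns).getD 0 ≤ 0
  · rw [if_pos hnp]
    have ht : ((PySem.Int.ofStr? ns).getD 0).toNat = 0 := by omega
    unfold pvMove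
    rw [ht]
    refine ⟨?_, hr0, hr1, hc0, hc1⟩
    split_ifs <;> simp [pvMoveN, pvMoveS, pvMoveW, pvMoveE]
  · rw [if_neg hnp]
    have hn1 : 1 ≤ (PySem.Int.ofStr? ns).getD 0 := by omega
    set n := (PySem.Int.ofStr? ns).getD 0 with hn
    have hrowmem : PySem.List.pyGetD park st.1 "" ∈ park := by
      rw [PySem.List.pyGetD_eq_getElem park "" hr0 hr1]
      exact List.getElem_mem _
    have hwrow : W ≤ PySem.Str.len (PySem.List.pyGetD park st.1 "") := hrect _ hrowmem
    unfold pvMove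
    by_cases hdN : d = "N"
    · subst hdN
      simp only [reduceIte]
      rw [pvCoreN park st hr0 n hn1, Prod.mk.eta]
      have hiff : (0 ≤ st.1 - n ∧ PySem.Str.isIn "X" (PySem.Str.slice
            (PySem.List.pyGetD (pvCols park (park.length : Int) W) st.2 "")
            (some (st.1 - n)) (some st.1)) = false)
          ↔ (0 ≤ st.1 - n ∧ ∀ i : Int, st.1 - n ≤ i → i < st.1 → pvCell park i st.2 ≠ 'X') :=
        and_congr_right fun hge =>
          pvColCondIff park W st.2 (st.1 - n) st.1 hc0 hc1 hge hr0 (le_of_lt hr1)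
      rw [if_congr hiff rfl rfl]
      constructor
      · rfl
      · split_ifs with hcnd
        · exact ⟨by omega, by omega, hc0, hc1⟩
        · exact ⟨hr0, hr1, hc0, hc1⟩
    · rw [if_neg hdN, if_neg hdN]
      by_cases hdS : d = "S"
      · subst hdS
        simp only [reduceIte]
        rw [pvCoreS park st (park.length : Int) (by omega) n hn1, Prod.mk.eta]
        have hiff : (st.1 + n < (park.length : Int) ∧ PySem.Str.isIn "X" (PySem.Str.slice
              (PySem.List.pyGetD (pvCols park (park.length : Int) W) st.2 "")
              (some (st.1 + 1)) (some (st.1 + n + 1))) = false)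
            ↔ (st.1 + n < (park.length : Int) ∧
                ∀ i : Int, st.1 + 1 ≤ i → i < st.1 + n + 1 → pvCell park i st.2 ≠ 'X') :=
          and_congr_right fun hlt =>
            pvColCondIff park W st.2 (st.1 + 1) (st.1 + n + 1) hc0 hc1 (by omega) (by omega) (by omega)
        rw [if_congr hiff rfl rfl]
        constructor
        · rfl
        · split_ifs with hcnd
          · exact ⟨by omega, hcnd.1, hc0, hc1⟩
          · exact ⟨hr0, hr1, hc0, hc1⟩
      · rw [if_neg hdS, if_neg hdS]
        by_cases hdW : d = "W"
        · subst hdW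
          simp only [reduceIte]
          rw [pvCoreW park st hc0 n hn1, Prod.mk.eta]
          have hiff : (0 ≤ st.2 - n ∧ PySem.Str.isIn "X" (PySem.Str.slice
                (PySem.List.pyGetD park st.1 "") (some (st.2 - n)) (some st.2)) = false)
              ↔ (0 ≤ st.2 - n ∧ ∀ i : Int, st.2 - n ≤ i → i < st.2 → pvCell park st.1 i ≠ 'X') :=
            and_congr_right fun hge =>
              pvRowCondIff park st.1 (st.2 - n) st.2 hge hc0 (by omega)
          rw [if_congr hiff rfl rfl]
          constructor
          · rfl
          · split_ifs with hcnd
            · exact ⟨hr0, hr1, by omega, by omega⟩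
            · exact ⟨hr0, hr1, hc0, hc1⟩
        · rw [if_neg hdW, if_neg hdW]
          by_cases hdE : d = "E"
          · subst hdE
            simp only [reduceIte]
            rw [pvCoreE park st W (by omega) n hn1, Prod.mk.eta]
            have hiff : (st.2 + n < W ∧ PySem.Str.isIn "X" (PySem.Str.slice
                  (PySem.List.pyGetD park st.1 "") (some (st.2 + 1)) (some (st.2 + n + 1))) = false)
                ↔ (st.2 + n < W ∧
                    ∀ i : Int, st.2 + 1 ≤ i → i < st.2 + n + 1 → pvCell park st.1 i ≠ 'X') :=
              and_congr_right fun hlt =>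
                pvRowCondIff park st.1 (st.2 + 1) (st.2 + n + 1) (by omega) (by omega) (by omega)
            rw [if_congr hiff rfl rfl]
            constructor
            · rfl
            · split_ifs with hcnd
              · exact ⟨hr0, hr1, by omega, hcnd.1⟩
              · exact ⟨hr0, hr1, hc0, hc1⟩
          · rw [if_neg hdE, if_neg hdE]
            exact ⟨Prod.mk.eta, hr0, hr1, hc0, hc1⟩

theorem pvFold_eq (park : List String) (W : Int)
    (hrect : ∀ s ∈ park, W ≤ PySem.Str.len s) :
    ∀ (routes : List String) (st : Int × Int), routes.all pvRouteOk = true → pvInb park W st →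
    routes.foldl (fun st route =>
      match PySem.Str.split₀ route with
      | [d, ns] => pvMove park (park.length : Int) W st.1 st.2 d ((PySem.Int.ofStr? ns).getD 0)
      | _ => st) st
    = routes.foldl (pvStepB park (pvCols park (park.length : Int) W) (park.length : Int) W) st := by
  intro routes
  induction routes with
  | nil => intro st _ _; rfl
  | cons r rest ih =>
    intro st hall hst
    simp only [List.all_cons, Bool.and_eq_true] at hall
    obtain ⟨heq, hinb⟩ := pvStep_eq park W st hst hrect r hall.1
    simp only [List.foldl_cons]
    rw [heq]
    exact ih _ hall.2 hinb

def pvFindRow (cs : List Char) (j : Int) : Option Int :=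
  match cs with
  | [] => none
  | c :: rest => if c = 'S' then some j else pvFindRow rest (j + 1)

theorem pvFindRow_none (cs : List Char) : ∀ a : Int, pvFindRow cs a = none ↔ 'S' ∉ cs := by
  induction cs with
  | nil => intro a; simp [pvFindRow]
  | cons c rest ih =>
    intro a
    by_cases hc : c = 'S'
    · simp [pvFindRow, hc]
    · simp [pvFindRow, hc, ih (a + 1), Ne.symm hc]

theorem pvFindRow_bounds (cs : List Char) : ∀ (a j : Int), pvFindRow cs a = some j →
    a ≤ j ∧ j < a + (cs.length : Int) := by
  induction cs with
  | nil => intro a j h; simp [pvFindRow] at h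
  | cons c rest ih =>
    intro a j h
    by_cases hc : c = 'S'
    · rw [pvFindRow, if_pos hc] at h
      simp only [Option.some.injEq] at h
      subst h
      simp only [List.length_cons]
      push_cast
      omega
    · rw [pvFindRow, if_neg hc] at h
      have := ih (a + 1) j h
      simp only [List.length_cons]
      push_cast
      omega

theorem pvFindRow_spec (cs : List Char) : ∀ (a : Int) (t : Nat), cs[t]? = some 'S' →
    (∀ i : Nat, i < t → cs[i]? ≠ some 'S') → pvFindRow cs a = some (a + (t : Int)) := by
  induction cs with
  | nil => intro a t h _; simp at h
  | cons c rest ih =>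
    intro a t h hmin
    cases t with
    | zero =>
      simp only [List.getElem?_cons_zero, Option.some.injEq] at h
      rw [pvFindRow, if_pos h]
      simp
    | succ t' =>
      have hc : c ≠ 'S' := by
        have := hmin 0 (by omega)
        simpa using this
      rw [pvFindRow, if_neg hc]
      have := ih (a + 1) t' (by simpa using h)
        (fun i hi => by have := hmin (i + 1) (by omega); simpa using this)
      rw [this]
      congr 1
      push_cast
      ring

theorem pvSingletonPrefix (l : List Char) (x : Char) : [x] <+: l ↔ l.head? = some x := by
  cases l with
  | nil => simp
  | cons a t => simp [List.cons_prefix_iff]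

theorem pvFindRow_eq_find (cs : List Char) :
    pvFindRow cs 0 = if PySem.Chars.find cs ['S'] = -1 then none
                     else some (PySem.Chars.find cs ['S']) := by
  by_cases h : PySem.Chars.find cs ['S'] = -1
  · rw [if_pos h, (pvFindRow_none cs 0).mpr]
    intro hm
    exact ((PySem.Chars.find_eq_neg_one_iff cs ['S']).mp h) ((pvSingletonInfix cs 'S').mpr hm)
  · rw [if_neg h]
    have hpos : 0 ≤ PySem.Chars.find cs ['S'] := by
      have := PySem.Chars.neg_one_le_find cs ['S']
      omega
    obtain ⟨hpre, hmin⟩ := PySem.Chars.find_spec hpos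
    have hget : cs[(PySem.Chars.find cs ['S']).toNat]? = some 'S' := by
      rw [← List.head?_drop]
      exact (pvSingletonPrefix _ 'S').mp hpre
    have hmin' : ∀ i : Nat, i < (PySem.Chars.find cs ['S']).toNat → cs[i]? ≠ some 'S' := by
      intro i hi hsome
      exact hmin i hi ((pvSingletonPrefix _ 'S').mpr (by rw [List.head?_drop]; exact hsome))
    rw [pvFindRow_spec cs 0 (PySem.Chars.find cs ['S']).toNat hget hmin']
    congr 1
    omega

theorem pvScanRow_eq (park : List String) (i : Int) :
    ∀ (cs : List Char) (a : Int) (st : Int × Int),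
    (∀ j : Nat, (hj : j < cs.length) → pvCell park i (a + (j : Int)) = cs[j]) →
    pvScanRow park i (PySem.List.pyRange a (a + (cs.length : Int)) 1) st =
      (match pvFindRow cs a with
       | some j => (i, j)
       | none => st) := by
  intro cs
  induction cs with
  | nil =>
    intro a st h
    rw [show a + (([] : List Char).length : Int) = a by simp, PySem.List.pyRange_one_eq_nil le_rfl]
    simp [pvScanRow, pvFindRow]
  | cons c rest ih =>
    intro a st h
    have hlt : a < a + (((c :: rest).length : Nat) : Int) := by simp only [List.length_cons]; push_cast; omega
    rw [PySem.List.pyRange_one_cons hlt]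
    have h0 : pvCell park i a = c := by
      have := h 0 (by simp)
      simpa using this
    by_cases hc : c = 'S'
    · rw [pvScanRow, if_pos (by rw [h0, hc]), pvFindRow, if_pos hc]
    · rw [pvScanRow, if_neg (by rw [h0]; exact hc), pvFindRow, if_neg hc]
      have hcast : a + (((c :: rest).length : Nat) : Int) = (a + 1) + (rest.length : Int) := by
        simp only [List.length_cons]; push_cast; omega
      rw [hcast]
      exact ih (a + 1) st (fun j hj => by
        have := h (j + 1) (by simpa using Nat.succ_lt_succ hj)
        simpa [add_assoc, add_comm, add_left_comm] using this)

def pvScanSuffix (w : Int) : List String → Int → (Int × Int) → Int × Int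
  | [], _, st => st
  | s :: rest, i, st =>
    pvScanSuffix w rest (i + 1)
      (match pvFindRow (s.toList.take w.toNat) 0 with
       | some j => (i, j)
       | none => st)

def pvFindSw (w : Int) : List String → Int → Option (Int × Int)
  | [], _ => none
  | s :: rest, i =>
    match pvFindRow (s.toList.take w.toNat) 0 with
    | some j => some (i, j)
    | none => pvFindSw w rest (i + 1)

theorem pvOuter_eq (park : List String) (W : Int) (hW0 : 0 ≤ W)
    (hrect : ∀ s ∈ park, W ≤ PySem.Str.len s) :
    ∀ (rest : List String) (k : Nat) (st : Int × Int), park.drop k = rest →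
    (PySem.List.pyRange (k : Int) (park.length : Int) 1).foldl
      (fun st i => pvScanRow park i (PySem.List.pyRange 0 W 1) st) st
    = pvScanSuffix W rest (k : Int) st := by
  intro rest
  induction rest with
  | nil =>
    intro k st hdrop
    have hlen : park.length ≤ k := List.drop_eq_nil_iff.mp hdrop
    have houter : PySem.List.pyRange (k : Int) (park.length : Int) = [] :=
      PySem.List.pyRange_one_eq_nil (by exact_mod_cast hlen)
    rw [houter]
    rfl
  | cons s rest' ih =>
    intro k st hdrop
    have hk : k < park.length := by
      by_contra hcon
      rw [List.drop_eq_nil_iff.mpr (by omega)] at hdrop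
      cases hdrop
    have hget : park[k] = s ∧ park.drop (k + 1) = rest' := by
      rw [List.drop_eq_getElem_cons hk] at hdrop
      exact ⟨(List.cons.injEq _ _ _ _ ▸ hdrop).1, (List.cons.injEq _ _ _ _ ▸ hdrop).2⟩
    have hmem : s ∈ park := hget.1 ▸ List.getElem_mem hk
    have hWle : W ≤ (s.toList.length : Int) := by
      have h1 := hrect s hmem
      have h2 : PySem.Str.len s = (s.toList.length : Int) := by simp [PySem.Str.len_eq]
      omega
    have hlen : (s.toList.take W.toNat).length = W.toNat := by
      simp only [List.length_take]
      omega
    have hklt : (k : Int) < (park.length : Int) := by exact_mod_cast hk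
    rw [PySem.List.pyRange_one_cons hklt]
    simp only [List.foldl_cons]
    have hcell : ∀ j : Nat, (hj : j < (s.toList.take W.toNat).length) →
        pvCell park (k : Int) ((0 : Int) + (j : Int)) = (s.toList.take W.toNat)[j] := by
      intro j hj
      unfold pvCell
      have h1 : PySem.List.pyGetD park ((k : Nat) : Int) "" = s := by
        rw [PySem.List.pyGetD_natCast, List.getD_eq_getElem?_getD, List.getElem?_eq_getElem hk,
          hget.1]
        rfl
      rw [zero_add, h1]
      have hj' : j < s.toList.length := by
        rw [hlen] at hj
        omega
      simp [List.getElem?_eq_getElem hj', List.getElem_take]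
    have hrow := pvScanRow_eq park (k : Int) (s.toList.take W.toNat) 0 st hcell
    rw [show (0 : Int) + ((s.toList.take W.toNat).length : Int) = W by rw [hlen]; omega] at hrow
    rw [hrow]
    show _ = pvScanSuffix W (s :: rest') (k : Int) st
    rw [pvScanSuffix]
    rw [show ((k : Int) + 1) = (((k + 1 : Nat) : Nat) : Int) by push_cast; ring]
    exact ih (k + 1) _ hget.2

theorem pvScanSuffix_noS (w : Int) : ∀ (rows : List String) (i : Int) (st : Int × Int),
    (∀ s ∈ rows, 'S' ∉ s.toList.take w.toNat) → pvScanSuffix w rows i st = st := by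
  intro rows
  induction rows with
  | nil => intro i st _; rfl
  | cons s rest ih =>
    intro i st h
    rw [pvScanSuffix, (pvFindRow_none _ 0).mpr (h s (by simp))]
    exact ih (i + 1) st (fun s' hs' => h s' (by simp [hs']))

theorem pvFindSw_none (w : Int) : ∀ (rows : List String) (i : Int),
    (∀ s ∈ rows, 'S' ∉ s.toList.take w.toNat) → pvFindSw w rows i = none := by
  intro rows
  induction rows with
  | nil => intro i _; rfl
  | cons s rest ih =>
    intro i h
    rw [pvFindSw, (pvFindRow_none _ 0).mpr (h s (by simp))]
    exact ih (i + 1) (fun s' hs' => h s' (by simp [hs']))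

theorem pvNoS_of_count0 (w : Int) (rows : List String)
    (h : (rows.flatMap (fun s => s.toList.take w.toNat)).count 'S' = 0) :
    ∀ s ∈ rows, 'S' ∉ s.toList.take w.toNat := by
  intro s hs hmem
  have : 'S' ∈ rows.flatMap (fun s => s.toList.take w.toNat) :=
    List.mem_flatMap.mpr ⟨s, hs, hmem⟩
  have := List.count_pos_iff.mpr this
  omega

theorem pvScan_count (w : Int) : ∀ (rows : List String) (i : Int) (st : Int × Int),
    (rows.flatMap (fun s => s.toList.take w.toNat)).count 'S' = 1 →
    pvScanSuffix w rows i st = (pvFindSw w rows i).getD (0, 0) ∧ (pvFindSw w rows i).isSome := by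
  intro rows
  induction rows with
  | nil => intro i st h; simp at h
  | cons s rest ih =>
    intro i st h
    rw [List.flatMap_cons, List.count_append] at h
    by_cases hs : 'S' ∈ s.toList.take w.toNat
    · have hrow : ¬ pvFindRow (s.toList.take w.toNat) 0 = none := by
        rw [pvFindRow_none]
        exact fun hn => hn hs
      obtain ⟨j, hj⟩ := Option.ne_none_iff_exists'.mp hrow
      have hcnt : (rest.flatMap (fun s => s.toList.take w.toNat)).count 'S' = 0 := by
        have := List.count_pos_iff.mpr hs
        omega
      have hnos : ∀ s' ∈ rest, 'S' ∉ s'.toList.take w.toNat := pvNoS_of_count0 w rest hcnt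
      constructor
      · rw [pvScanSuffix, hj, pvFindSw, hj]
        simp only [Option.getD_some]
        exact pvScanSuffix_noS w rest (i + 1) (i, j) hnos
      · rw [pvFindSw, hj]
        rfl
    · have hrow : pvFindRow (s.toList.take w.toNat) 0 = none := (pvFindRow_none _ 0).mpr hs
      have hcnt : (rest.flatMap (fun s => s.toList.take w.toNat)).count 'S' = 1 := by
        have : (s.toList.take w.toNat).count 'S' = 0 := List.count_eq_zero.mpr hs
        omega
      rw [pvScanSuffix, hrow, pvFindSw, hrow]
      exact ih (i + 1) st hcnt

theorem pvFindSw_bounds (w : Int) (hw : 0 ≤ w) : ∀ (rows : List String) (i : Int) (p : Int × Int),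
    pvFindSw w rows i = some p →
    i ≤ p.1 ∧ p.1 < i + (rows.length : Int) ∧ 0 ≤ p.2 ∧ p.2 < w := by
  intro rows
  induction rows with
  | nil => intro i p h; simp [pvFindSw] at h
  | cons s rest ih =>
    intro i p h
    rw [pvFindSw] at h
    cases hj : pvFindRow (s.toList.take w.toNat) 0 with
    | some j =>
      rw [hj] at h
      have hb := pvFindRow_bounds _ 0 j hj
      have hle : ((s.toList.take w.toNat).length : Int) ≤ w := by
        have := List.length_take_le w.toNat s.toList
        omega
      simp only [Option.some.injEq] at h
      subst h
      simp only [List.length_cons]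
      push_cast
      refine ⟨le_refl i, by omega, by omega, by omega⟩
    | none =>
      rw [hj] at h
      have := ih (i + 1) p h
      simp only [List.length_cons]
      push_cast
      omega

theorem pvScanStart_eq (park : List String) (w : Int) (hw : 0 ≤ w) :
    ∀ (rest : List String) (k : Nat), park.drop k = rest →
    pvScanStart park w (PySem.List.pyRange (k : Int) (park.length : Int) 1)
      = (pvFindSw w rest (k : Int)).getD (0, 0) := by
  intro rest
  induction rest with
  | nil =>
    intro k hdrop
    have hlen : park.length ≤ k := List.drop_eq_nil_iff.mp hdrop
    rw [PySem.List.pyRange_one_eq_nil (by exact_mod_cast hlen)]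
    rfl
  | cons s rest' ih =>
    intro k hdrop
    have hk : k < park.length := by
      by_contra hcon
      rw [List.drop_eq_nil_iff.mpr (by omega)] at hdrop
      cases hdrop
    have hget : park[k] = s ∧ park.drop (k + 1) = rest' := by
      rw [List.drop_eq_getElem_cons hk] at hdrop
      exact ⟨(List.cons.injEq _ _ _ _ ▸ hdrop).1, (List.cons.injEq _ _ _ _ ▸ hdrop).2⟩
    have hklt : (k : Int) < (park.length : Int) := by exact_mod_cast hk
    rw [PySem.List.pyRange_one_cons hklt, pvScanStart]
    have hs : PySem.List.pyGetD park ((k : Nat) : Int) "" = s := by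
      rw [PySem.List.pyGetD_natCast, List.getD_eq_getElem?_getD, List.getElem?_eq_getElem hk,
        hget.1]
      rfl
    have hfind : PySem.Str.find (PySem.Str.slice s none (some w)) "S" =
        PySem.Chars.find (s.toList.take w.toNat) ['S'] := by
      have ht : (PySem.Str.slice s none (some w)).toList = s.toList.take w.toNat := by
        simp [pysem, PySem.List.slice_to _ hw]
      simp [ht]
    rw [hs, hfind]
    rw [show pvFindSw w (s :: rest') (k : Int) =
        (match pvFindRow (s.toList.take w.toNat) 0 with
         | some j => some ((k : Int), j)
         | none => pvFindSw w rest' ((k : Int) + 1)) from rfl]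
    rw [pvFindRow_eq_find]
    by_cases hf : PySem.Chars.find (s.toList.take w.toNat) ['S'] = -1
    · rw [if_pos hf, if_neg (by simp [hf])]
      rw [show ((k : Int) + 1) = (((k + 1 : Nat) : Nat) : Int) by push_cast; ring]
      exact ih (k + 1) hget.2
    · rw [if_neg hf, if_pos (by simp [hf])]
      rfl

theorem pvStartEq (park : List String) (W : Int) (hW0 : 0 ≤ W)
    (hrect : ∀ s ∈ park, W ≤ PySem.Str.len s)
    (hcount : (park.flatMap (fun s => s.toList.take W.toNat)).count 'S' ≤ 1) :
    (PySem.List.pyRange 0 (park.length : Int) 1).foldl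
      (fun st i => pvScanRow park i (PySem.List.pyRange 0 W 1) st) (0, 0)
    = (pvFindSw W park 0).getD (0, 0) := by
  have h1 := pvOuter_eq park W hW0 hrect park 0 (0, 0) rfl
  simp only [Nat.cast_zero] at h1
  rcases Nat.le_one_iff_eq_zero_or_eq_one.mp hcount with hc | hc
  · have hnos := pvNoS_of_count0 W park hc
    rw [h1, pvScanSuffix_noS W park 0 (0, 0) hnos, pvFindSw_none W park 0 hnos]
    rfl
  · exact h1.trans (pvScan_count W park 0 (0, 0) hc).1

theorem pvStartInb (park : List String) (W : Int) (hne : park ≠ []) (hW0 : 0 ≤ W) (hW1 : 1 ≤ W) :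
    pvInb park W ((pvFindSw W park 0).getD (0, 0)) := by
  cases hp : pvFindSw W park 0 with
  | some p =>
    have hb := pvFindSw_bounds W hW0 park 0 p hp
    simp only [Option.getD_some]
    exact ⟨hb.1, by omega, hb.2.2.1, hb.2.2.2⟩
  | none =>
    simp only [Option.getD_none]
    have : park.length ≠ 0 := fun h => hne (List.eq_nil_of_length_eq_zero h)
    exact ⟨le_refl 0, by simp; omega, le_refl 0, by omega⟩

theorem solution_spec : Claim_equal_solution := by
  intro park routes _ hpre
  obtain ⟨hne, hrect, hcount, hroutes, hwor⟩ := hpre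
  unfold Spec_solution solution solution_alt
  simp only []
  have hW0 : 0 ≤ PySem.Str.len (PySem.List.pyGetD park 0 "") := by
    simp [PySem.Str.len_eq]
  rw [pvStartEq park _ hW0 hrect hcount]
  have hscan := pvScanStart_eq park (PySem.Str.len (PySem.List.pyGetD park 0 "")) hW0 park 0 rfl
  simp only [Nat.cast_zero] at hscan
  rw [hscan]
  rcases hwor with hre | hW1
  · subst hre
    rfl
  · rw [pvFold_eq park _ hrect routes _ hroutes (pvStartInb park _ hne hW0 hW1)]
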